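-- pv_equiv track=rewrite | github.com/lightward/ai | history/update.py | format_tool_calls_block
-- ===== SOURCE A (Python) =====
-- def format_tool_calls_block(calls):
--     """Collapse a list of (category, detail) tool calls into readable markdown."""
--     # Group consecutive same-category calls
--     groups = []
--     for cat, detail in calls:
--         if groups and groups[-1][0] == cat:
--             groups[-1][1].append(detail)
--         else:
--             groups.append((cat, [detail]))
--
--     lines = []
--     for cat, details in groups:
--         if cat in ("Read", "Write", "Edit", "Glob", "Grep"):
--             # File-like: list paths compactly
--             paths = [f"`{d}`" for d in details]
--             if len(paths) <= 3:
--                 lines.append(f"*[{cat} {', '.join(paths)}]*")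
--             else:
--                 lines.append(f"*[{cat} {', '.join(paths[:3])}, +{len(paths)-3} more]*")
--         elif cat == "Bash":
--             for d in details:
--                 lines.append(f"*[Bash: `{d}`]*")
--         elif cat == "Subagent":
--             for d in details:
--                 lines.append(f"*[Subagent: {d}]*")
--         else:
--             for d in details:
--                 lines.append(f"*[{cat}: {d}]*")
--
--     return "\n> ".join(lines)
-- ===== SOURCE B (Python) =====
-- def format_tool_calls_block(calls):
--     """Collapse a list of (category, detail) tool calls into readable markdown.
--
--     Single pass: keep the current run (category, details) and flush it to
--     `lines` whenever the category changes, and once more at the end.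
--     No intermediate groups list is built."""
--     lines = []
--
--     def flush(cat, details):
--         if cat in ("Read", "Write", "Edit", "Glob", "Grep"):
--             paths = ["`%s`" % d for d in details]
--             if len(paths) <= 3:
--                 lines.append("*[%s %s]*" % (cat, ", ".join(paths)))
--             else:
--                 lines.append("*[%s %s, +%d more]*" % (cat, ", ".join(paths[:3]), len(paths) - 3))
--         elif cat == "Bash":
--             for d in details:
--                 lines.append("*[Bash: `%s`]*" % d)
--         elif cat == "Subagent":
--             for d in details:
--                 lines.append("*[Subagent: %s]*" % d)
--         else:
--             for d in details:
--                 lines.append("*[%s: %s]*" % (cat, d))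
--
--     cur_cat = None
--     cur_details = []
--     for cat, detail in calls:
--         if cur_details and cur_cat == cat:
--             cur_details.append(detail)
--         else:
--             if cur_details:
--                 flush(cur_cat, cur_details)
--             cur_cat, cur_details = cat, [detail]
--     if cur_details:
--         flush(cur_cat, cur_details)
--     return "\n> ".join(lines)
-- ===== Notes on version B (the rewrite author's own statement) =====
-- stated objective: alternative
-- what changed: Single pass over calls with a buffered current run flushed on category change (and at end), instead of first building an intermediate groups list and then formatting it in a second loop.
import Mathlib
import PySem

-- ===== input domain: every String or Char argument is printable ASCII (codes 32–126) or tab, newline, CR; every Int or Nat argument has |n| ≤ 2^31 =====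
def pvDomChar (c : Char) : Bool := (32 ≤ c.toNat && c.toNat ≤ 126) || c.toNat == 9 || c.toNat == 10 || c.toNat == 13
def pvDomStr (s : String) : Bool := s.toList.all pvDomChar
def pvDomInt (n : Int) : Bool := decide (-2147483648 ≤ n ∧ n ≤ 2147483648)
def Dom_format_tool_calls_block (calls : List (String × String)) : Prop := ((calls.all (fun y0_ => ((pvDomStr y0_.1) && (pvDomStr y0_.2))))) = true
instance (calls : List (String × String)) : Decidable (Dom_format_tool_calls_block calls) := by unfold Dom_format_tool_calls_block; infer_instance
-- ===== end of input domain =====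

-- B is a single pass with a buffered current run flushed on category change, instead of
-- A's two phases (build a groups list, then format it); same return value (alternative decomposition).

-- ===== PORT A =====
-- step of A's first loop: append detail to the last group if the category matches, else start a new group
def pvStepA (groups : List (String × List String)) (cd : String × String) : List (String × List String) :=
  match groups.getLast? with
  | some g => if g.1 = cd.1 then groups.dropLast ++ [(g.1, g.2 ++ [cd.2])]
              else groups ++ [(cd.1, [cd.2])]
  | none => groups ++ [(cd.1, [cd.2])]

-- step of A's second loop: append the lines for one group (inner for-loops ported as foldl appends;
-- paths[:3] on a list of length > 3 is exactly List.take 3)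
def pvLinesA (lines : List String) (g : String × List String) : List String :=
  if g.1 = "Read" ∨ g.1 = "Write" ∨ g.1 = "Edit" ∨ g.1 = "Glob" ∨ g.1 = "Grep" then
    let paths := g.2.map (fun d => "`" ++ d ++ "`")
    if paths.length ≤ 3 then
      lines ++ ["*[" ++ g.1 ++ " " ++ String.intercalate ", " paths ++ "]*"]
    else
      lines ++ ["*[" ++ g.1 ++ " " ++ String.intercalate ", " (paths.take 3) ++ ", +" ++
                PySem.Int.toStr ((paths.length : Int) - 3) ++ " more]*"]
  else if g.1 = "Bash" then
    g.2.foldl (fun ls d => ls ++ ["*[Bash: `" ++ d ++ "`]*"]) lines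
  else if g.1 = "Subagent" then
    g.2.foldl (fun ls d => ls ++ ["*[Subagent: " ++ d ++ "]*"]) lines
  else
    g.2.foldl (fun ls d => ls ++ ["*[" ++ g.1 ++ ": " ++ d ++ "]*"]) lines

def format_tool_calls_block (calls : List (String × String)) : String :=
  let groups := calls.foldl pvStepA []
  let lines := groups.foldl pvLinesA []
  String.intercalate "\n> " lines

-- ===== PORT B =====
-- B's flush: the lines produced for one buffered run (for-loop appends into a fresh buffer = map)
def pvFlushB (cat : String) (details : List String) : List String :=
  if cat = "Read" ∨ cat = "Write" ∨ cat = "Edit" ∨ cat = "Glob" ∨ cat = "Grep" then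
    let paths := details.map (fun d => "`" ++ d ++ "`")
    if paths.length ≤ 3 then
      ["*[" ++ cat ++ " " ++ String.intercalate ", " paths ++ "]*"]
    else
      ["*[" ++ cat ++ " " ++ String.intercalate ", " (paths.take 3) ++ ", +" ++
       PySem.Int.toStr ((paths.length : Int) - 3) ++ " more]*"]
  else if cat = "Bash" then details.map (fun d => "*[Bash: `" ++ d ++ "`]*")
  else if cat = "Subagent" then details.map (fun d => "*[Subagent: " ++ d ++ "]*")
  else details.map (fun d => "*[" ++ cat ++ ": " ++ d ++ "]*")

-- B's single loop: accumulated lines plus the current (category, details) run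
def pvGoB : List (String × String) → List String → String × List String → List String
  | [], lines, r => lines ++ pvFlushB r.1 r.2
  | (cat, d) :: rest, lines, (c, ds) =>
      if c = cat then pvGoB rest lines (c, ds ++ [d])
      else pvGoB rest (lines ++ pvFlushB c ds) (cat, [d])

def format_tool_calls_block_alt (calls : List (String × String)) : String :=
  match calls with
  | [] => String.intercalate "\n> " []
  | (cat, d) :: rest => String.intercalate "\n> " (pvGoB rest [] (cat, [d]))

-- ===== PRECONDITION & SPEC =====
def Spec_format_tool_calls_block (calls : List (String × String)) (out : String) : Prop := out = format_tool_calls_block_alt calls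
instance (calls : List (String × String)) (out : String) : Decidable (Spec_format_tool_calls_block calls out) := by unfold Spec_format_tool_calls_block; infer_instance

-- ===== CLAIM (what is proved, stated in full; the proofs are below) =====
def Claim_equal_format_tool_calls_block : Prop := ∀ (calls : List (String × String)), Dom_format_tool_calls_block calls → Spec_format_tool_calls_block calls (format_tool_calls_block calls)

-- ===== LEMMAS AND PROOFS =====

theorem foldl_app_map (f : String → String) :
    ∀ (ds : List String) (ls : List String),
      ds.foldl (fun ls d => ls ++ [f d]) ls = ls ++ ds.map f := by
  intro ds
  induction ds with
  | nil => intro ls; simp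
  | cons d ds ih => intro ls; simp [List.foldl, ih]

-- one group's lines, appended
theorem linesA_eq_flush (lines : List String) (g : String × List String) :
    pvLinesA lines g = lines ++ pvFlushB g.1 g.2 := by
  unfold pvLinesA pvFlushB
  split_ifs <;>
    first
      | (exact (apply_ite (fun l => lines ++ l) _ _ _).symm)
      | simp [foldl_app_map (fun d => "*[Bash: `" ++ d ++ "`]*"),
              foldl_app_map (fun d => "*[Subagent: " ++ d ++ "]*"),
              foldl_app_map (fun d => "*[" ++ g.1 ++ ": " ++ d ++ "]*")]

theorem foldl_linesA (gs : List (String × List String)) :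
    ∀ (lines : List String),
      gs.foldl pvLinesA lines = lines ++ gs.flatMap (fun g => pvFlushB g.1 g.2) := by
  induction gs with
  | nil => intro lines; simp
  | cons g gs ih => intro lines; simp [List.foldl, linesA_eq_flush, ih]

theorem stepA_ne_nil (gs : List (String × List String)) (x : String × String) :
    pvStepA gs x ≠ [] := by
  unfold pvStepA
  cases h : gs.getLast? <;> simp; split_ifs <;> simp

theorem stepA_append (g0 gs : List (String × List String)) (x : String × String)
    (h : gs ≠ []) : pvStepA (g0 ++ gs) x = g0 ++ pvStepA gs x := by
  unfold pvStepA
  rw [List.getLast?_append_of_ne_nil g0 h, List.dropLast_append_of_ne_nil h]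
  cases hl : gs.getLast? with
  | none => exact absurd (List.getLast?_eq_none_iff.mp hl) h
  | some g =>
      dsimp only
      split_ifs <;> simp [List.append_assoc]

theorem foldl_stepA_append (rest : List (String × String)) :
    ∀ (g0 gs : List (String × List String)), gs ≠ [] →
      rest.foldl pvStepA (g0 ++ gs) = g0 ++ rest.foldl pvStepA gs := by
  induction rest with
  | nil => intro g0 gs _; simp
  | cons x rest ih =>
      intro g0 gs h
      simp only [List.foldl, stepA_append g0 gs x h]
      exact ih g0 (pvStepA gs x) (stepA_ne_nil gs x)

-- the main invariant: B's single pass equals formatting A's groups, run by run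
theorem goB_eq (rest : List (String × String)) :
    ∀ (c : String) (ds : List String) (lines : List String),
      pvGoB rest lines (c, ds) =
        lines ++ (rest.foldl pvStepA [(c, ds)]).flatMap (fun g => pvFlushB g.1 g.2) := by
  induction rest with
  | nil => intro c ds lines; simp [pvGoB]
  | cons x rest ih =>
      intro c ds lines
      obtain ⟨cat, d⟩ := x
      by_cases hc : c = cat
      · subst hc
        have hstep : pvStepA [(c, ds)] (c, d) = [(c, ds ++ [d])] := by
          simp [pvStepA]
        simp [pvGoB, List.foldl, hstep, ih]
      · have hstep : pvStepA [(c, ds)] (cat, d) = [(c, ds)] ++ [(cat, [d])] := by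
          simp [pvStepA, hc]
        simp only [pvGoB, hc, List.foldl, hstep,
          foldl_stepA_append rest [(c, ds)] [(cat, [d])] (by simp)]
        simp [ih]

-- ===== VERDICT (by name: the statement is the Claim_ definition above) =====
theorem format_tool_calls_block_spec : Claim_equal_format_tool_calls_block := by
  intro calls _
  unfold Spec_format_tool_calls_block format_tool_calls_block format_tool_calls_block_alt
  cases calls with
  | nil => simp
  | cons x rest =>
      obtain ⟨cat, d⟩ := x
      have h0 : pvStepA [] (cat, d) = [(cat, [d])] := by simp [pvStepA]
      simp [List.foldl, h0, foldl_linesA, goB_eq]
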